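-- pv_equiv track=rewrite | github.com/NB-Dragon/AdvancedDownloader | helper/BashReader.py | _scan_no_quote_string
-- ===== SOURCE A (Python) =====
-- def _scan_no_quote_string(content: str, index: int, previous_result: dict):
--     escape_string = previous_result["escape_string"]
--     while index < len(content):
--         if content[index] == "\\":
--             escape_string = False if escape_string else True
--         elif content[index] in ["\"", "\'"]:
--             break
--         elif escape_string:
--             escape_string = False
--         index += 1
--     return index, {"escape_string": escape_string}
-- ===== SOURCE B (Python) =====
-- def _scan_no_quote_string(content: str, index: int, previous_result: dict):
--     escape_string = previous_result["escape_string"]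
--     tail = content[index:]
--     seglen = next((i for i, c in enumerate(tail) if c in "\"'"), len(tail))
--     seg = tail[:seglen]
--     bs = len(seg) - len(seg.rstrip("\\"))
--     if seg:
--         if bs == len(seg):
--             escape_string = escape_string != (bs % 2 == 1)
--         else:
--             escape_string = bs % 2 == 1
--     return index + seglen, {"escape_string": escape_string}
-- ===== Notes on version B (the rewrite author's own statement) =====
-- stated objective: alternative
-- what changed: A's per-character while loop threading a mutable escape flag is replaced by a stateless decomposition: slice the tail, locate the first quote position, and derive the escape flag from the parity of the trailing backslash run of that segment (XORed with the incoming flag only when the segment is all backslashes).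
import Mathlib
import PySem

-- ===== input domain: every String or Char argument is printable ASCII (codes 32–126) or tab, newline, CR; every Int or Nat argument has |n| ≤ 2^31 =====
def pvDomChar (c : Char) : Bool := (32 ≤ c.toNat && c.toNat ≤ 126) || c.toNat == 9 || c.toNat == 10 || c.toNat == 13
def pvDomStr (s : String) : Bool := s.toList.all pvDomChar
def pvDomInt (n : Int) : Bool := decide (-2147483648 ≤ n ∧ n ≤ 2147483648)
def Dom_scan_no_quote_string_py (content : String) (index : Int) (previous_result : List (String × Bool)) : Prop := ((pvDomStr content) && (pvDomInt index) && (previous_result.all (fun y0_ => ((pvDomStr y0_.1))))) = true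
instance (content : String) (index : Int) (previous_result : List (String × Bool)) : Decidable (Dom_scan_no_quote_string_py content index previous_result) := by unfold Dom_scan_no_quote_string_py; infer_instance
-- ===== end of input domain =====

-- B replaces A's per-character escape-state loop by a slice, a stateless first-quote search and a
-- trailing-backslash-run parity computation (objective: alternative decomposition, same cost).

-- ===== PORT A =====
-- the while loop of A: fuel counts the remaining iterations; pyGet? none = IndexError (excluded by Pre_)
def pvScanLoopA (chars : List Char) (fuel : Nat) (index : Int) (esc : Bool) : Int × Bool :=
  match fuel with
  | 0 => (index, esc)
  | fuel + 1 =>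
    if index < (chars.length : Int) then
      match PySem.List.pyGet? chars index with
      | none => (index, esc)  -- unreachable under Pre_ (Python would raise IndexError)
      | some c =>
        if c = '\\' then pvScanLoopA chars fuel (index + 1) (!esc)
        else if c = '"' ∨ c = '\'' then (index, esc)
        else pvScanLoopA chars fuel (index + 1) false
    else (index, esc)

def scan_no_quote_string_py (content : String) (index : Int) (previous_result : List (String × Bool)) : Int × (List (String × Bool)) :=
  match List.lookup "escape_string" previous_result with   -- previous_result["escape_string"]
  | none => (index, [])  -- Python raises KeyError (excluded by Pre_)
  | some escape_string =>
    let cs := content.toList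
    let r := pvScanLoopA cs (((cs.length : Int) - index).toNat) index escape_string
    (r.1, [("escape_string", r.2)])

-- ===== PORT B =====
-- next((i for i, c in enumerate(tail) if c in "\"'"), len(tail)): first index of a quote, else len
def pvFirstQuoteIdx : List Char → Nat
  | [] => 0
  | c :: rest => if c = '"' ∨ c = '\'' then 0 else pvFirstQuoteIdx rest + 1

def scan_no_quote_string_py_alt (content : String) (index : Int) (previous_result : List (String × Bool)) : Int × (List (String × Bool)) :=
  match List.lookup "escape_string" previous_result with   -- previous_result["escape_string"]
  | none => (index, [])  -- Python raises KeyError (excluded by Pre_)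
  | some escape_string =>
    let tail := PySem.List.slice content.toList (some index) none     -- content[index:]
    let seglen := pvFirstQuoteIdx tail
    let seg := tail.take seglen                                       -- tail[:seglen]
    let bs := (seg.reverse.takeWhile (· = '\\')).length  -- len(seg) - len(seg.rstrip("\\")): trailing backslash run (exact)
    let esc := if seg ≠ [] then
                 (if bs = seg.length then xor escape_string (decide (bs % 2 = 1)) else decide (bs % 2 = 1))
               else escape_string
    ((index + (seglen : Int)), [("escape_string", esc)])

-- ===== PRECONDITION & SPEC =====
-- Pre_ excludes negative index (A then scans via Python's negative-index wraparound, outside the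
-- scanner's natural domain) and dicts without the "escape_string" key (A raises KeyError there).
def Pre_scan_no_quote_string_py (content : String) (index : Int) (previous_result : List (String × Bool)) : Prop :=
  0 ≤ index ∧ (List.lookup "escape_string" previous_result).isSome
instance (content : String) (index : Int) (previous_result : List (String × Bool)) : Decidable (Pre_scan_no_quote_string_py content index previous_result) := by unfold Pre_scan_no_quote_string_py; infer_instance
def pvWitness_scan_no_quote_string_py : String × Int × (List (String × Bool)) := ("a\\\"b", 0, [("escape_string", false)])

def Spec_scan_no_quote_string_py (content : String) (index : Int) (previous_result : List (String × Bool)) (out : Int × (List (String × Bool))) : Prop := out = scan_no_quote_string_py_alt content index previous_result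
instance (content : String) (index : Int) (previous_result : List (String × Bool)) (out : Int × (List (String × Bool))) : Decidable (Spec_scan_no_quote_string_py content index previous_result out) := by unfold Spec_scan_no_quote_string_py; infer_instance

-- ===== CLAIM (what is proved, stated in full; the proofs are below) =====
def Claim_equal_scan_no_quote_string_py : Prop := ∀ (content : String) (index : Int) (previous_result : List (String × Bool)), Dom_scan_no_quote_string_py content index previous_result → Pre_scan_no_quote_string_py content index previous_result → Spec_scan_no_quote_string_py content index previous_result (scan_no_quote_string_py content index previous_result)

-- ===== LEMMAS AND PROOFS =====

-- the pure suffix recursion both ports are reduced to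
def pvScanL : List Char → Bool → Nat × Bool
  | [], esc => (0, esc)
  | c :: rest, esc =>
    if c = '\\' then ((pvScanL rest (!esc)).1 + 1, (pvScanL rest (!esc)).2)
    else if c = '"' ∨ c = '\'' then (0, esc)
    else ((pvScanL rest false).1 + 1, (pvScanL rest false).2)

theorem pvScanLoopA_eq (cs : List Char) (fuel i : Nat) (esc : Bool)
    (h : cs.length - i ≤ fuel) :
    pvScanLoopA cs fuel (i : Int) esc =
      (((i + (pvScanL (cs.drop i) esc).1 : Nat) : Int), (pvScanL (cs.drop i) esc).2) := by
  induction fuel generalizing i esc with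
  | zero =>
    have hlen : cs.length ≤ i := by omega
    simp [pvScanLoopA, List.drop_eq_nil_of_le hlen, pvScanL]
  | succ fuel ih =>
    by_cases hlt : i < cs.length
    · have hget : PySem.List.pyGet? cs (i : Int) = some cs[i] := by
        simp [PySem.List.pyGet?_natCast, List.getElem?_eq_getElem hlt]
      have hdrop : cs.drop i = cs[i] :: cs.drop (i + 1) := List.drop_eq_getElem_cons hlt
      have hcast : ((i : Int)) + 1 = ((i + 1 : Nat) : Int) := by push_cast; ring
      rw [pvScanLoopA]
      rw [if_pos (by exact_mod_cast hlt), hget, hdrop]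
      dsimp only
      by_cases hbs : cs[i] = '\\'
      · rw [if_pos hbs]
        rw [hcast, ih (i + 1) (!esc) (by omega)]
        simp [pvScanL, hbs]
        omega
      · rw [if_neg hbs]
        by_cases hq : cs[i] = '"' ∨ cs[i] = '\''
        · rw [if_pos hq]
          simp only [pvScanL, if_neg hbs, if_pos hq]
          simp
        · rw [if_neg hq]
          rw [hcast, ih (i + 1) false (by omega)]
          simp only [pvScanL, if_neg hbs, if_neg hq]
          rw [show i + 1 + (pvScanL (List.drop (i + 1) cs) false).1
                = i + ((pvScanL (List.drop (i + 1) cs) false).1 + 1) from by omega]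
    · have hge : cs.length ≤ i := by omega
      rw [pvScanLoopA, if_neg (by exact_mod_cast hlt)]
      simp [List.drop_eq_nil_of_le hge, pvScanL]

-- trailing backslash run
def pvTr (l : List Char) : Nat := (l.reverse.takeWhile (· = '\\')).length

theorem pv_tw_append (p : Char → Bool) (xs ys : List Char) :
    (xs ++ ys).takeWhile p = if xs.all p then xs ++ ys.takeWhile p else xs.takeWhile p := by
  induction xs with
  | nil => simp
  | cons c xs ih =>
    by_cases hc : p c
    · simp [List.takeWhile, List.all_cons, hc, ih]
      split_ifs <;> simp [List.takeWhile, hc]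
    · simp [List.takeWhile, List.all_cons, hc]

theorem pvTr_cons (c : Char) (l : List Char) :
    pvTr (c :: l) = if l.all (· = '\\') then (if c = '\\' then l.length + 1 else l.length) else pvTr l := by
  unfold pvTr
  rw [show (c :: l).reverse = l.reverse ++ [c] from by simp]
  rw [pv_tw_append]
  by_cases hall : l.all (· = '\\')
  · have : l.reverse.all (· = '\\') := by simpa using hall
    rw [if_pos this, if_pos hall]
    by_cases hc : c = '\\' <;> simp [List.takeWhile, hc]
  · have : ¬ l.reverse.all (· = '\\') := by simpa using hall
    rw [if_neg this, if_neg hall]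

theorem pvTr_eq_length_iff (l : List Char) : pvTr l = l.length ↔ l.all (· = '\\') := by
  constructor
  · intro h
    have hpre := List.takeWhile_prefix (l := l.reverse) (p := (· = '\\'))
    have : l.reverse.takeWhile (· = '\\') = l.reverse := by
      apply List.IsPrefix.eq_of_length hpre
      simpa [pvTr] using h
    have hall : l.reverse.all (· = '\\') := by
      rw [← this]; exact List.all_takeWhile
    simpa using hall
  · intro h
    have : l.reverse.all (· = '\\') := by simpa using h
    unfold pvTr
    rw [List.takeWhile_eq_self_iff.mpr (by intro a ha; exact (List.all_eq_true.mp this) a ha)]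
    simp

theorem pvTr_all (l : List Char) (h : l.all (· = '\\')) : pvTr l = l.length :=
  (pvTr_eq_length_iff l).mpr h

-- B's escape value from the segment, as computed in the port
def pvEscOf (seg : List Char) (esc : Bool) : Bool :=
  if seg ≠ [] then
    (if (seg.reverse.takeWhile (· = '\\')).length = seg.length
     then xor esc (decide ((seg.reverse.takeWhile (· = '\\')).length % 2 = 1))
     else decide ((seg.reverse.takeWhile (· = '\\')).length % 2 = 1))
  else esc

theorem pvEscOf_eq (seg : List Char) (esc : Bool) :
    pvEscOf seg esc =
      if seg = [] then esc
      else if seg.all (· = '\\') then xor esc (decide (pvTr seg % 2 = 1))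
      else decide (pvTr seg % 2 = 1) := by
  unfold pvEscOf pvTr
  by_cases h : seg = []
  · simp [h]
  · by_cases hall : seg.all (· = '\\')
    · have hlen : (seg.reverse.takeWhile (· = '\\')).length = seg.length :=
        (pvTr_eq_length_iff seg).mpr hall
      simp [h, hall, hlen, pvTr]
    · have hlen : ¬ (seg.reverse.takeWhile (· = '\\')).length = seg.length :=
        fun hc => hall ((pvTr_eq_length_iff seg).mp hc)
      simp [h, hall, hlen, pvTr]

theorem pvScanL_fst (l : List Char) (esc : Bool) : (pvScanL l esc).1 = pvFirstQuoteIdx l := by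
  induction l generalizing esc with
  | nil => simp [pvScanL, pvFirstQuoteIdx]
  | cons c rest ih =>
    by_cases hbs : c = '\\'
    · have hq : ¬ (c = '"' ∨ c = '\'') := by subst hbs; decide
      simp [pvScanL, pvFirstQuoteIdx, hbs, hq, ih]
    · by_cases hq : c = '"' ∨ c = '\''
      · simp [pvScanL, pvFirstQuoteIdx, hbs, hq]
      · simp [pvScanL, pvFirstQuoteIdx, hbs, hq, ih]

theorem pvEscOf_cons_bs (seg : List Char) (esc : Bool) :
    pvEscOf ('\\' :: seg) esc = pvEscOf seg (!esc) := by
  by_cases hnil : seg = []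
  · subst hnil; cases esc <;> decide
  · rw [pvEscOf_eq, pvEscOf_eq]
    have htr := pvTr_cons '\\' seg
    by_cases hall : seg.all (· = '\\')
    · have hall' : ('\\' :: seg).all (· = '\\') := by simp [List.all_cons, hall]
      have h1 : pvTr ('\\' :: seg) = seg.length + 1 := by rw [htr, if_pos hall]; simp
      have h2 : pvTr seg = seg.length := pvTr_all seg hall
      rw [if_neg (by simp), if_pos hall', if_neg hnil, if_pos hall, h1, h2]
      rcases Nat.mod_two_eq_zero_or_one seg.length with hm | hm <;>
        simp [Nat.add_mod, hm] <;> cases esc <;> simp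
    · have hall' : ¬ ('\\' :: seg).all (· = '\\') := by simp [List.all_cons, hall]
      rw [if_neg (by simp), if_neg hall', if_neg hnil, if_neg hall, htr, if_neg hall]

theorem pvEscOf_cons_other (c : Char) (seg : List Char) (esc : Bool) (hbs : ¬ c = '\\') :
    pvEscOf (c :: seg) esc = pvEscOf seg false := by
  have htr := pvTr_cons c seg
  have hall' : ¬ (c :: seg).all (· = '\\') := by simp [List.all_cons, hbs]
  rw [pvEscOf_eq, pvEscOf_eq, if_neg (by simp), if_neg hall']
  by_cases hnil : seg = []
  · subst hnil
    have h0 : pvTr [c] = 0 := by rw [htr]; simp [hbs]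
    rw [h0]; simp
  · rw [if_neg hnil]
    by_cases hall : seg.all (· = '\\')
    · have h1 : pvTr (c :: seg) = seg.length := by rw [htr, if_pos hall, if_neg hbs]
      have h2 : pvTr seg = seg.length := pvTr_all seg hall
      rw [if_pos hall, h1, h2]; simp
    · rw [if_neg hall, htr, if_neg hall]

theorem pvScanL_snd (l : List Char) (esc : Bool) :
    (pvScanL l esc).2 = pvEscOf (l.take (pvFirstQuoteIdx l)) esc := by
  induction l generalizing esc with
  | nil => simp [pvScanL, pvFirstQuoteIdx, pvEscOf]
  | cons c rest ih =>
    by_cases hq : c = '"' ∨ c = '\''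
    · have hbs : ¬ c = '\\' := by rcases hq with h | h <;> subst h <;> decide
      simp [pvScanL, pvFirstQuoteIdx, hq, hbs, pvEscOf]
    · have hstep : pvFirstQuoteIdx (c :: rest) = pvFirstQuoteIdx rest + 1 := by
        simp [pvFirstQuoteIdx, hq]
      have htake : (c :: rest).take (pvFirstQuoteIdx (c :: rest)) = c :: rest.take (pvFirstQuoteIdx rest) := by
        rw [hstep]; simp
      rw [htake]
      by_cases hbs : c = '\\'
      · have hL : (pvScanL (c :: rest) esc).2 = (pvScanL rest (!esc)).2 := by
          simp [pvScanL, hbs, hq]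
        subst hbs
        rw [hL, ih (!esc), pvEscOf_cons_bs]
      · have hL : (pvScanL (c :: rest) esc).2 = (pvScanL rest false).2 := by
          simp [pvScanL, hbs, hq]
        rw [hL, ih false, pvEscOf_cons_other c _ _ hbs]

-- ===== VERDICT (by name: the statement is the Claim_ definition above) =====
theorem scan_no_quote_string_py_spec : Claim_equal_scan_no_quote_string_py := by
  intro content index previous_result _hdom hpre
  obtain ⟨hix, hkey⟩ := hpre
  unfold Spec_scan_no_quote_string_py scan_no_quote_string_py scan_no_quote_string_py_alt
  obtain ⟨esc, hesc⟩ := Option.isSome_iff_exists.mp hkey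
  rw [hesc]
  dsimp only
  set cs := content.toList with hcs
  obtain ⟨i, rfl⟩ := Int.eq_ofNat_of_zero_le hix
  have hslice : PySem.List.slice cs (some (i : Int)) none = cs.drop i := PySem.List.slice_from_natCast cs i
  have hfuel : cs.length - i ≤ ((cs.length : Int) - (i : Int)).toNat := by omega
  rw [pvScanLoopA_eq cs _ i esc hfuel]
  simp only [hslice]
  rw [pvScanL_fst, pvScanL_snd]
  unfold pvEscOf
  push_cast
  rfl
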